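-- pv_equiv track=rewrite | github.com/aratrikghosh2011-tech/numclassify | numclassify.py | is_sociable
-- ===== SOURCE A (Python) =====
-- def _proper_factors(n):
--     if n < 2: return []
--     return [i for i in range(1, n) if n % i == 0]
--
-- def aliquot_sum(n):
--     return sum(_proper_factors(n))
--
-- def is_sociable(n, max_steps=30):
--     seen = []
--     current = n
--     for _ in range(max_steps):
--         current = aliquot_sum(current)
--         if current == n: return True
--         if current in seen: return False
--         seen.append(current)
--     return False
-- ===== SOURCE B (Python) =====
-- def _aliquot(n):
--     # sum of proper divisors via trial division up to sqrt(n)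
--     if n < 2:
--         return 0
--     total = 1
--     i = 2
--     while i * i <= n:
--         if n % i == 0:
--             total += i
--             j = n // i
--             if j != i:
--                 total += j
--         i += 1
--     return total
--
-- def is_sociable(n, max_steps=30):
--     seen = set()
--     current = n
--     for _ in range(max_steps):
--         current = _aliquot(current)
--         if current == n:
--             return True
--         if current in seen:
--             return False
--         seen.add(current)
--     return False
-- ===== Notes on version B (the rewrite author's own statement) =====
-- stated objective: faster
-- what changed: The aliquot (proper-divisor) sum is computed by trial division up to sqrt(current), adding each divisor together with its cofactor, instead of scanning every integer below current; the seen-values check uses a set instead of a list. Intended as faster; a timing run measured B ahead at every size (120x at the largest size A finished) but could not confirm at the top size because A timed out there.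
import Mathlib
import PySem

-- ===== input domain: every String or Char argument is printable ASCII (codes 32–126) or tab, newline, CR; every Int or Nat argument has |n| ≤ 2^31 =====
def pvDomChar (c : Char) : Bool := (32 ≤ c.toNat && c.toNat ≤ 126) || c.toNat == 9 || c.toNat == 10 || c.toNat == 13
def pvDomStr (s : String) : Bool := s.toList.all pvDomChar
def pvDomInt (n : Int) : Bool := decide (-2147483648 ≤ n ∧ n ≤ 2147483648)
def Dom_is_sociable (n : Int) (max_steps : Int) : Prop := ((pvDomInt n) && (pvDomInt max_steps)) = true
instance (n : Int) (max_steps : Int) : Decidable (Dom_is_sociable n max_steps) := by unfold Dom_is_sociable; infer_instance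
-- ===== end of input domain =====

-- ===== PORT A =====
-- B computes the aliquot sum by trial division up to sqrt(current) (pairing each divisor with its
-- cofactor) instead of scanning every integer below current; intended as faster (asymptotic; the
-- timing run measured B ahead at every size, 120x at the largest size A finished).
def pv_proper_factors (n : Int) : List Int :=
  if n < 2 then [] else (PySem.List.pyRange 1 n).filter (fun i => PySem.Int.mod n i == 0)

def pv_aliquot_sum (n : Int) : Int := (pv_proper_factors n).sum

def pvALoop (n : Int) (fuel : Nat) (seen : List Int) (current : Int) : Bool :=
  match fuel with
  | 0 => false
  | f + 1 =>
    let c := pv_aliquot_sum current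
    if c == n then true
    else if seen.contains c then false
    else pvALoop n f (seen ++ [c]) c

def is_sociable (n : Int) (max_steps : Int) : Bool :=
  pvALoop n max_steps.toNat [] n

-- ===== PORT B =====
-- the 'while i * i <= n' trial-division loop of Source B's _aliquot (on Nat: values are nonnegative there)
def pvAltLoop (m : Nat) (i : Nat) (acc : Nat) : Nat :=
  if _h : i * i ≤ m then
    pvAltLoop m (i + 1) (if m % i = 0 then acc + i + (if m / i ≠ i then m / i else 0) else acc)
  else acc
termination_by m + 1 - i
decreasing_by
  rcases Nat.eq_zero_or_pos i with h0 | h0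
  · omega
  · have : i ≤ i * i := Nat.le_mul_of_pos_left i h0
    omega

def pv_aliquot_alt (n : Int) : Int :=
  if n < 2 then 0 else Int.ofNat (pvAltLoop n.toNat 2 1)

def pvBLoop (n : Int) (fuel : Nat) (seen : PySem.Set Int) (current : Int) : Bool :=
  match fuel with
  | 0 => false
  | f + 1 =>
    let c := pv_aliquot_alt current
    if c == n then true
    else if PySem.Set.contains seen c then false
    else pvBLoop n f (PySem.Set.add seen c) c

def is_sociable_alt (n : Int) (max_steps : Int) : Bool :=
  pvBLoop n max_steps.toNat PySem.Set.empty n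

-- ===== PRECONDITION & SPEC =====
def Spec_is_sociable (n : Int) (max_steps : Int) (out : Bool) : Prop := out = is_sociable_alt n max_steps
instance (n : Int) (max_steps : Int) (out : Bool) : Decidable (Spec_is_sociable n max_steps out) := by unfold Spec_is_sociable; infer_instance

-- ===== CLAIM (what is proved, stated in full; the proofs are below) =====
def Claim_equal_is_sociable : Prop := ∀ (n : Int) (max_steps : Int), Dom_is_sociable n max_steps → Spec_is_sociable n max_steps (is_sociable n max_steps)

-- ===== LEMMAS AND PROOFS =====

-- the set of proper divisors (as a Finset of Nat); both aliquot sums are proved equal to its sum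
def pvDivs (m : Nat) : Finset Nat := (Finset.Ico 1 m).filter (fun d => d ∣ m)

-- divisors still to be collected by B's trial-division loop from counter value i on:
-- small divisors not yet reached, and large divisors whose cofactor is not yet reached
def pvS (m i : Nat) : Finset Nat :=
  (Finset.Ico 1 m).filter (fun d => d ∣ m ∧ ((i ≤ d ∧ d * d ≤ m) ∨ (m < d * d ∧ i * d ≤ m)))

lemma pvS_mem (m i d : Nat) :
    d ∈ pvS m i ↔ 1 ≤ d ∧ d < m ∧ d ∣ m ∧ ((i ≤ d ∧ d * d ≤ m) ∨ (m < d * d ∧ i * d ≤ m)) := by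
  simp [pvS, Finset.mem_filter, Finset.mem_Ico]
  tauto

lemma pvS_empty (m i : Nat) (h : ¬ i * i ≤ m) : pvS m i = ∅ := by
  ext d
  simp only [pvS_mem, Finset.notMem_empty, iff_false]
  rintro ⟨h1, hdm, hdvd, ⟨hid, hdd⟩ | ⟨hdd, him⟩⟩
  · exact h (le_trans (Nat.mul_le_mul hid hid) hdd)
  · have hdi : d < i := Nat.lt_of_mul_lt_mul_left (a := i) (by omega)
    have hid : i < d := Nat.lt_of_mul_lt_mul_right (a := d) (by omega)
    omega

lemma pvS_step_nodvd (m i : Nat) (hi : 2 ≤ i) (hmod : m % i ≠ 0) :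
    pvS m i = pvS m (i + 1) := by
  ext d
  simp only [pvS_mem]
  constructor
  · rintro ⟨h1, hdm, hdvd, ⟨hid, hdd⟩ | ⟨hdd, him⟩⟩
    · have hne : d ≠ i := by
        rintro rfl
        obtain ⟨k, hk⟩ := hdvd
        exact hmod (by rw [hk]; exact Nat.mul_mod_right d k)
      exact ⟨h1, hdm, hdvd, Or.inl ⟨by omega, hdd⟩⟩
    · have hne : i * d ≠ m := by
        rintro rfl; exact hmod (Nat.mul_mod_right i d)
      obtain ⟨k, hk⟩ := hdvd
      have hik : i < k := by
        have h0 : d * i < d * k := by have := Nat.mul_comm i d; omega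
        exact Nat.lt_of_mul_lt_mul_left h0
      refine ⟨h1, hdm, ⟨k, hk⟩, Or.inr ⟨hdd, ?_⟩⟩
      have h1' : (i + 1) * d ≤ k * d := Nat.mul_le_mul (by omega) (le_refl d)
      have h2' : k * d = d * k := Nat.mul_comm k d
      omega
  · rintro ⟨h1, hdm, hdvd, ⟨hid, hdd⟩ | ⟨hdd, him⟩⟩
    · exact ⟨h1, hdm, hdvd, Or.inl ⟨by omega, hdd⟩⟩
    · refine ⟨h1, hdm, hdvd, Or.inr ⟨hdd, ?_⟩⟩
      have h1' : i * d ≤ (i + 1) * d := Nat.mul_le_mul (by omega) (le_refl d)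
      omega

lemma pvS_i_notmem (m i : Nat) (hle : i * i ≤ m) : i ∉ pvS m (i + 1) := by
  simp only [pvS_mem, not_and, not_or]
  intro _ _ _
  exact ⟨fun h => by omega, fun h => by omega⟩

lemma pvS_step_sq (m i : Nat) (hle : i * i ≤ m) (hi : 2 ≤ i) (hmod : m % i = 0)
    (hJ : m / i = i) : pvS m i = insert i (pvS m (i + 1)) := by
  have hdvd : i ∣ m := Nat.dvd_of_mod_eq_zero hmod
  have hm : m = i * i := by rw [← Nat.mul_div_cancel' hdvd, hJ]
  ext d
  simp only [pvS_mem, Finset.mem_insert]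
  constructor
  · rintro ⟨h1, hdm, hddvd, ⟨hid, hdd⟩ | ⟨hdd, him⟩⟩
    · by_cases hde : d = i
      · exact Or.inl hde
      · exact Or.inr ⟨h1, hdm, hddvd, Or.inl ⟨by omega, hdd⟩⟩
    · have hne : i * d ≠ m := by
        intro he
        have hdi : d = i := Nat.eq_of_mul_eq_mul_left (by omega) (he.trans hm)
        subst hdi
        omega
      obtain ⟨k, hk⟩ := hddvd
      have hik : i < k := by
        have h0 : d * i < d * k := by have := Nat.mul_comm i d; omega
        exact Nat.lt_of_mul_lt_mul_left h0
      refine Or.inr ⟨h1, hdm, ⟨k, hk⟩, Or.inr ⟨hdd, ?_⟩⟩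
      have h1' : (i + 1) * d ≤ k * d := Nat.mul_le_mul (by omega) (le_refl d)
      have h2' : k * d = d * k := Nat.mul_comm k d
      omega
  · rintro (rfl | ⟨h1, hdm, hddvd, ⟨hid, hdd⟩ | ⟨hdd, him⟩⟩)
    · refine ⟨by omega, ?_, hdvd, Or.inl ⟨le_rfl, hle⟩⟩
      have h2' : 2 * d ≤ d * d := Nat.mul_le_mul hi (le_refl d)
      omega
    · exact ⟨h1, hdm, hddvd, Or.inl ⟨by omega, hdd⟩⟩
    · refine ⟨h1, hdm, hddvd, Or.inr ⟨hdd, ?_⟩⟩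
      have h1' : i * d ≤ (i + 1) * d := Nat.mul_le_mul (by omega) (le_refl d)
      omega

lemma pvS_step_two (m i : Nat) (hle : i * i ≤ m) (hi : 2 ≤ i) (hmod : m % i = 0)
    (hJ : m / i ≠ i) :
    pvS m i = insert i (insert (m / i) (pvS m (i + 1)))
      ∧ i ∉ insert (m / i) (pvS m (i + 1)) ∧ m / i ∉ pvS m (i + 1) := by
  have hdvd : i ∣ m := Nat.dvd_of_mod_eq_zero hmod
  have hm : i * (m / i) = m := Nat.mul_div_cancel' hdvd
  have hiJ : i ≤ m / i := (Nat.le_div_iff_mul_le (by omega)).2 hle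
  have hiJ' : i < m / i := by omega
  have hJJ : m < (m / i) * (m / i) := by
    have h0 : i * (m / i) < (m / i) * (m / i) := Nat.mul_lt_mul_of_lt_of_le hiJ' (le_refl (m / i)) (by omega)
    omega
  have hJm : m / i < m := by
    have h2' : 2 * (m / i) ≤ i * (m / i) := Nat.mul_le_mul hi (le_refl _)
    omega
  refine ⟨?_, ?_, ?_⟩
  · ext d
    simp only [pvS_mem, Finset.mem_insert]
    constructor
    · rintro ⟨h1, hdm, hddvd, ⟨hid, hdd⟩ | ⟨hdd, him⟩⟩
      · by_cases hde : d = i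
        · exact Or.inl hde
        · exact Or.inr (Or.inr ⟨h1, hdm, hddvd, Or.inl ⟨by omega, hdd⟩⟩)
      · by_cases hde : d = m / i
        · exact Or.inr (Or.inl hde)
        · have hne : i * d ≠ m := by
            intro he
            exact hde (by rw [← he, Nat.mul_div_cancel_left d (by omega)])
          obtain ⟨k, hk⟩ := hddvd
          have hik : i < k := by
            have h0 : d * i < d * k := by have := Nat.mul_comm i d; omega
            exact Nat.lt_of_mul_lt_mul_left h0
          refine Or.inr (Or.inr ⟨h1, hdm, ⟨k, hk⟩, Or.inr ⟨hdd, ?_⟩⟩)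
          have h1' : (i + 1) * d ≤ k * d := Nat.mul_le_mul (by omega) (le_refl d)
          have h2' : k * d = d * k := Nat.mul_comm k d
          omega
    · rintro (rfl | rfl | ⟨h1, hdm, hddvd, ⟨hid, hdd⟩ | ⟨hdd, him⟩⟩)
      · refine ⟨by omega, ?_, hdvd, Or.inl ⟨le_rfl, hle⟩⟩
        have h2' : 2 * d ≤ d * d := Nat.mul_le_mul hi (le_refl d)
        omega
      · refine ⟨by omega, hJm, ⟨i, ?_⟩, Or.inr ⟨hJJ, by omega⟩⟩
        have := Nat.mul_comm i (m / i)
        omega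
      · exact ⟨h1, hdm, hddvd, Or.inl ⟨by omega, hdd⟩⟩
      · refine ⟨h1, hdm, hddvd, Or.inr ⟨hdd, ?_⟩⟩
        have h1' : i * d ≤ (i + 1) * d := Nat.mul_le_mul (by omega) (le_refl d)
        omega
  · simp only [Finset.mem_insert, not_or]
    exact ⟨by omega, pvS_i_notmem m i hle⟩
  · simp only [pvS_mem, not_and, not_or]
    intro _ _ _
    refine ⟨fun h => by omega, fun h => ?_⟩
    have hexp : (i + 1) * (m / i) = i * (m / i) + m / i := by ring
    omega

lemma pvAltLoop_inv (m : Nat) :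
    ∀ k i acc, m + 1 - i ≤ k → 2 ≤ i → pvAltLoop m i acc = acc + ∑ d ∈ pvS m i, d := by
  intro k
  induction k with
  | zero =>
    intro i acc hk hi
    have hle : ¬ i * i ≤ m := by
      intro hc
      have : i ≤ i * i := Nat.le_mul_of_pos_left i (by omega)
      omega
    rw [pvAltLoop, dif_neg hle, pvS_empty m i hle, Finset.sum_empty]
    omega
  | succ k ihk =>
    intro i acc hk hi
    rw [pvAltLoop]
    by_cases hle : i * i ≤ m
    · rw [dif_pos hle, ihk (i + 1) _ (by omega) (by omega)]
      by_cases hmod : m % i = 0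
      · by_cases hJ : m / i ≠ i
        · obtain ⟨he, hi1, hi2⟩ := pvS_step_two m i hle hi hmod hJ
          rw [if_pos hmod, if_pos hJ, he, Finset.sum_insert hi1, Finset.sum_insert hi2]
          omega
        · rw [if_pos hmod, if_neg hJ, pvS_step_sq m i hle hi hmod (by omega),
            Finset.sum_insert (pvS_i_notmem m i hle)]
          omega
      · rw [if_neg hmod, pvS_step_nodvd m i hi hmod]
    · rw [dif_neg hle, pvS_empty m i hle, Finset.sum_empty]
      omega

lemma pvS_two (m : Nat) (hm : 2 ≤ m) :
    pvDivs m = insert 1 (pvS m 2) ∧ 1 ∉ pvS m 2 := by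
  constructor
  · ext d
    simp only [pvDivs, Finset.mem_filter, Finset.mem_Ico, Finset.mem_insert, pvS_mem]
    constructor
    · rintro ⟨⟨h1, hdm⟩, hdvd⟩
      by_cases hde : d = 1
      · exact Or.inl hde
      · by_cases hdd : d * d ≤ m
        · exact Or.inr ⟨h1, hdm, hdvd, Or.inl ⟨by omega, hdd⟩⟩
        · obtain ⟨k, hk⟩ := hdvd
          have hk1 : 1 < k := by
            have h0 : d * 1 < d * k := by omega
            exact Nat.lt_of_mul_lt_mul_left h0
          refine Or.inr ⟨h1, hdm, ⟨k, hk⟩, Or.inr ⟨by omega, ?_⟩⟩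
          have h1' : 2 * d ≤ k * d := Nat.mul_le_mul (by omega) (le_refl d)
          have h2' : k * d = d * k := Nat.mul_comm k d
          omega
    · rintro (rfl | ⟨h1, hdm, hdvd, _⟩)
      · exact ⟨⟨le_rfl, by omega⟩, one_dvd m⟩
      · exact ⟨⟨h1, hdm⟩, hdvd⟩
  · simp only [pvS_mem, not_and, not_or]
    intro _ _ _
    exact ⟨fun h => by omega, fun h => by omega⟩

lemma pvB_sum (m : Nat) (hm : 2 ≤ m) :
    pvAltLoop m 2 1 = ∑ d ∈ pvDivs m, d := by
  obtain ⟨he, h1⟩ := pvS_two m hm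
  rw [pvAltLoop_inv m (m + 1) 2 1 (by omega) le_rfl, he, Finset.sum_insert h1]

lemma pvA_list (n : Int) (m : Nat) :
    ((PySem.List.pyRange 1 (m : Int)).filter (fun i => PySem.Int.mod n i == 0)).sum
      = ∑ d ∈ (Finset.Ico 1 m).filter (fun d : Nat => PySem.Int.mod n (d : Int) = 0), (d : Int) := by
  induction m with
  | zero => simp [PySem.List.pyRange]
  | succ m ih =>
    rcases Nat.eq_zero_or_pos m with rfl | hm
    · simp [PySem.List.pyRange]
    · have hr : PySem.List.pyRange 1 ((m : Int) + 1) = PySem.List.pyRange 1 (m : Int) ++ [(m : Int)] :=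
        PySem.List.pyRange_one_succ_right (by exact_mod_cast hm)
      push_cast
      rw [hr, List.filter_append, List.sum_append, ih, Finset.sum_filter, Finset.sum_filter,
        Finset.sum_Ico_succ_top (by omega : 1 ≤ m)]
      by_cases hp : PySem.Int.mod n (m : Int) = 0
      · simp [hp]
      · simp [hp]

lemma pvA_sum (m : Nat) (hm : 2 ≤ m) :
    pv_aliquot_sum (m : Int) = ∑ d ∈ pvDivs m, (d : Int) := by
  unfold pv_aliquot_sum pv_proper_factors
  rw [if_neg (by omega), pvA_list]
  refine Finset.sum_congr ?_ (fun _ _ => rfl)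
  unfold pvDivs
  refine Finset.filter_congr fun d _ => ?_
  rw [PySem.Int.mod_eq_zero_iff_dvd]
  exact Int.natCast_dvd_natCast

lemma pv_aliquot_eq (n : Int) : pv_aliquot_sum n = pv_aliquot_alt n := by
  by_cases h : n < 2
  · unfold pv_aliquot_sum pv_proper_factors pv_aliquot_alt
    rw [if_pos h, if_pos h]
    rfl
  · have hn : 2 ≤ n := not_lt.1 h
    have hmn : ((n.toNat : Int)) = n := Int.toNat_of_nonneg (by omega)
    have hm2 : 2 ≤ n.toNat := by omega
    have hA := pvA_sum n.toNat hm2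
    rw [hmn] at hA
    rw [hA]
    unfold pv_aliquot_alt
    rw [if_neg (by omega), pvB_sum n.toNat hm2]
    rw [Int.ofNat_eq_natCast, Nat.cast_sum]

lemma pvLoop_eq (fuel : Nat) (n : Int) (seen : List Int) (cur : Int) :
    pvALoop n fuel seen cur = pvBLoop n fuel seen cur := by
  induction fuel generalizing seen cur with
  | zero => rfl
  | succ f ih =>
    simp only [pvALoop, pvBLoop, pv_aliquot_eq, PySem.Set.contains, PySem.Set.add]
    by_cases h1 : pv_aliquot_alt cur == n
    · simp [h1]
    · by_cases h2 : pv_aliquot_alt cur ∈ seen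
      · simp [h1, h2]
      · simp [h1, h2, ih]

-- ===== VERDICT (by name: the statement is the Claim_ definition above) =====
theorem is_sociable_spec : Claim_equal_is_sociable := by
  intro n max_steps _
  unfold Spec_is_sociable is_sociable is_sociable_alt
  exact pvLoop_eq _ _ _ _
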